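-- pv_equiv track=rewrite | github.com/IorenzoLF/Le_Refuge | Le_refuge/arc_agi_refuge/puzzle_11_final.py | compter_escaliers
-- ===== SOURCE A (Python) =====
-- def compter_escaliers(grille):
--     escaliers = 0
--
--     # Horizontal
--     for i in range(len(grille)):
--         row = grille[i]
--         if est_escalier_horizontal(row):
--             escaliers += 1
--
--     # Vertical
--     for j in range(len(grille[0])):
--         col = [grille[i][j] for i in range(len(grille))]
--         if est_escalier_vertical(col):
--             escaliers += 1
--
--     return escaliers
--
-- def est_escalier_horizontal(ligne):
--     couleurs = [c for c in ligne if c != 0]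
--     if len(couleurs) < 2:
--         return False
--
--     changements = 0
--     for i in range(1, len(couleurs)):
--         if couleurs[i] != couleurs[i-1]:
--             changements += 1
--
--     return changements >= 1
--
-- def est_escalier_vertical(colonne):
--     couleurs = [c for c in colonne if c != 0]
--     if len(couleurs) < 2:
--         return False
--
--     changements = 0
--     for i in range(1, len(couleurs)):
--         if couleurs[i] != couleurs[i-1]:
--             changements += 1
--
--     return changements >= 1
-- ===== SOURCE B (Python) =====
-- def compter_escaliers(grille):
--     cols = [[grille[i][j] for i in range(len(grille))] for j in range(len(grille[0]))]
--     return sum(len({c for c in ligne if c != 0}) >= 2 for ligne in grille + cols)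
-- ===== Notes on version B (the rewrite author's own statement) =====
-- stated objective: simpler
-- what changed: Replaces the two identical adjacent-pair change-counting helpers with a single pass that counts rows and columns whose non-zero entries form a set of at least two distinct values (distinctness test instead of consecutive-change loop).
import Mathlib
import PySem

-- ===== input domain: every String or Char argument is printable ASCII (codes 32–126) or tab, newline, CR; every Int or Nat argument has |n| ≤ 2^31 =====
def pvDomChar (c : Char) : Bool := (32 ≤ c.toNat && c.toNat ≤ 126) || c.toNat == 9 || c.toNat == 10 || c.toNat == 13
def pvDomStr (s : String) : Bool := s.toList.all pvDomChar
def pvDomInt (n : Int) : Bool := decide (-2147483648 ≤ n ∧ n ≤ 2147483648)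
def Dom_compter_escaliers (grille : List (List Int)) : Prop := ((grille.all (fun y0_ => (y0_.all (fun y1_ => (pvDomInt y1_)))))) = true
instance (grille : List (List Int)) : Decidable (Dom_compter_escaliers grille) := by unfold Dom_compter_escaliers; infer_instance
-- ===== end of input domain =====

-- B replaces the adjacent-pair change-counting loops by a single distinct-non-zero-values test per row/column (simpler, same cost).

-- ===== PORT A =====
def est_escalier_horizontal (ligne : List Int) : Bool :=
  let couleurs := ligne.filter (fun c => c ≠ 0)
  if couleurs.length < 2 then false
  else
    let changements := (PySem.List.pyRange 1 couleurs.length 1).foldl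
      (fun ch i => if PySem.List.pyGetD couleurs i 0 ≠ PySem.List.pyGetD couleurs (i-1) 0 then ch + 1 else ch) (0 : Int)
    decide (1 ≤ changements)

def est_escalier_vertical (colonne : List Int) : Bool :=
  let couleurs := colonne.filter (fun c => c ≠ 0)
  if couleurs.length < 2 then false
  else
    let changements := (PySem.List.pyRange 1 couleurs.length 1).foldl
      (fun ch i => if PySem.List.pyGetD couleurs i 0 ≠ PySem.List.pyGetD couleurs (i-1) 0 then ch + 1 else ch) (0 : Int)
    decide (1 ≤ changements)

def compter_escaliers (grille : List (List Int)) : Int :=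
  let afterRows := (PySem.List.pyRange 0 grille.length 1).foldl
    (fun acc i =>
      let row := PySem.List.pyGetD grille i []
      if est_escalier_horizontal row then acc + 1 else acc) (0 : Int)
  (PySem.List.pyRange 0 (PySem.List.pyGetD grille 0 []).length 1).foldl
    (fun acc j =>
      let col := (PySem.List.pyRange 0 grille.length 1).map
        (fun i => PySem.List.pyGetD (PySem.List.pyGetD grille i []) j 0)
      if est_escalier_vertical col then acc + 1 else acc) afterRows

-- ===== PORT B =====
def compter_escaliers_alt (grille : List (List Int)) : Int :=
  let cols := (PySem.List.pyRange 0 (PySem.List.pyGetD grille 0 []).length 1).map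
    (fun j => (PySem.List.pyRange 0 grille.length 1).map
      (fun i => PySem.List.pyGetD (PySem.List.pyGetD grille i []) j 0))
  ((grille ++ cols).map
    (fun ligne => if 2 ≤ (PySem.Set.ofList (ligne.filter (fun c => c ≠ 0))).length then (1 : Int) else 0)).sum

-- ===== PRECONDITION & SPEC =====
-- Pre_ excludes exactly the inputs where Python A raises IndexError: the empty grid (grille[0]) and
-- ragged grids whose first row is longer than some later row (grille[i][j] out of range).
def Pre_compter_escaliers (grille : List (List Int)) : Prop :=
  grille ≠ [] ∧ ∀ row ∈ grille, grille.headI.length ≤ row.length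
instance (grille : List (List Int)) : Decidable (Pre_compter_escaliers grille) := by
  unfold Pre_compter_escaliers; infer_instance

def pvWitness_compter_escaliers : List (List Int) := [[1, 2], [0, 1]]

def Spec_compter_escaliers (grille : List (List Int)) (out : Int) : Prop := out = compter_escaliers_alt grille
instance (grille : List (List Int)) (out : Int) : Decidable (Spec_compter_escaliers grille out) := by
  unfold Spec_compter_escaliers; infer_instance

-- ===== CLAIM (what is proved, stated in full; the proofs are below) =====
def Claim_equal_compter_escaliers : Prop := ∀ (grille : List (List Int)), Dom_compter_escaliers grille → Pre_compter_escaliers grille → Spec_compter_escaliers grille (compter_escaliers grille)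

-- ===== LEMMAS AND PROOFS =====

-- all elements of an equality-chained list are equal
lemma pv_allEq (c : List Int) (h : c.IsChain (· = ·)) (x y : Int) (hx : x ∈ c) (hy : y ∈ c) : x = y := by
  have hp : c.Pairwise (· = ·) := h.pairwise
  by_cases hxy : x = y
  · exact hxy
  · exact List.Pairwise.forall (fun a b (h : a = b) => h.symm) hp hx hy hxy

lemma pv_notchain (c : List Int) (h : ¬ c.IsChain (· = ·)) :
    ∃ i : Nat, i + 1 < c.length ∧ c.getD i 0 ≠ c.getD (i+1) 0 := by
  rw [List.isChain_iff_getElem] at h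
  push_neg at h
  obtain ⟨i, h1, h3⟩ := h
  refine ⟨i, by omega, ?_⟩
  rw [List.getD_eq_getElem _ _ (by omega), List.getD_eq_getElem _ _ (by omega)]
  exact h3

lemma pv_chain_getD (c : List Int) (h : c.IsChain (· = ·)) (i : Nat) (hi : i + 1 < c.length) :
    c.getD i 0 = c.getD (i+1) 0 := by
  rw [List.isChain_iff_getElem] at h
  rw [List.getD_eq_getElem _ _ (by omega), List.getD_eq_getElem _ _ (by omega)]
  exact h i (by omega)

-- two distinct members force at least two distinct values
lemma pv_two_le_ofList_len (c : List Int) (a b : Int) (ha : a ∈ c) (hb : b ∈ c) (hab : a ≠ b) :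
    2 ≤ (PySem.Set.ofList c).length := by
  have ha' : a ∈ PySem.Set.ofList c := (PySem.Set.mem_ofList _ _).2 ha
  have hb' : b ∈ PySem.Set.ofList c := (PySem.Set.mem_ofList _ _).2 hb
  match hs : PySem.Set.ofList c with
  | [] => rw [hs] at ha'; simp at ha'
  | [x] => rw [hs] at ha' hb'; simp at ha' hb'; exact absurd (ha'.trans hb'.symm) hab
  | x :: y :: t => simp

-- the set of an equality-chained list has at most one element
lemma pv_ofList_len_le_one (c : List Int) (h : c.IsChain (· = ·)) :
    (PySem.Set.ofList c).length ≤ 1 := by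
  by_contra hlt
  match hs : PySem.Set.ofList c with
  | [] => rw [hs] at hlt; simp at hlt
  | [x] => rw [hs] at hlt; simp at hlt
  | x :: y :: t =>
    have hnd := PySem.Set.nodup_ofList (xs := c)
    rw [hs] at hnd
    have hxy : x ≠ y := by intro he; subst he; simp at hnd
    have hx : x ∈ c := (PySem.Set.mem_ofList _ _).1 (by rw [hs]; simp)
    have hy : y ∈ c := (PySem.Set.mem_ofList _ _).1 (by rw [hs]; simp)
    exact hxy (pv_allEq c h x y hx hy)

-- a Prop-ite counting fold is a countP
lemma pv_foldl_count_pos (L : List Int) (P : Int → Prop) [DecidablePred P] :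
    (1 ≤ L.foldl (fun ch i => if P i then ch + 1 else ch) (0 : Int)) ↔ ∃ i ∈ L, P i := by
  have he : (fun (ch : Int) i => if P i then ch + 1 else ch)
      = (fun ch i => if (fun i => decide (P i)) i = true then ch + 1 else ch) := by
    funext ch i; simp
  rw [he, PySem.List.foldl_count_if]
  constructor
  · intro h
    have : 0 < L.countP (fun i => decide (P i)) := by omega
    obtain ⟨a, ha, hp⟩ := List.countP_pos_iff.1 this
    exact ⟨a, ha, by simpa using hp⟩
  · intro ⟨a, ha, hp⟩
    have : 0 < L.countP (fun i => decide (P i)) :=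
      List.countP_pos_iff.2 ⟨a, ha, by simpa using hp⟩
    omega

-- key fact: "some adjacent change among the non-zeros" = "at least two distinct non-zero values"
lemma pv_changes_iff (c : List Int) :
    (2 ≤ c.length ∧ ¬ c.IsChain (· = ·)) ↔ 2 ≤ (PySem.Set.ofList c).length := by
  constructor
  · rintro ⟨hlen, hch⟩
    obtain ⟨i, hi, hne⟩ := pv_notchain c hch
    rw [List.getD_eq_getElem _ _ (by omega), List.getD_eq_getElem _ _ (by omega)] at hne
    exact pv_two_le_ofList_len c _ _ (List.getElem_mem _) (List.getElem_mem _) hne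
  · intro h2
    have hle := PySem.Set.length_ofList_le c
    refine ⟨by omega, fun hch => ?_⟩
    have := pv_ofList_len_le_one c hch
    omega

lemma est_escalier_vertical_eq (l : List Int) :
    est_escalier_vertical l = est_escalier_horizontal l := rfl

-- A's per-line test equals B's per-line test
lemma est_eq_variee (l : List Int) :
    est_escalier_horizontal l =
      decide (2 ≤ (PySem.Set.ofList (l.filter (fun c => c ≠ 0))).length) := by
  unfold est_escalier_horizontal
  set c := l.filter (fun c => c ≠ 0) with hc
  by_cases hlen : c.length < 2
  · have hle := PySem.Set.length_ofList_le c
    simp only [if_pos hlen]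
    have : ¬ (2 ≤ (PySem.Set.ofList c).length) := by omega
    simp [this]
  · simp only [if_neg hlen]
    rw [show (decide (2 ≤ (PySem.Set.ofList c).length))
        = decide (2 ≤ c.length ∧ ¬ c.IsChain (· = ·)) by
      simp only [decide_eq_decide]; exact (pv_changes_iff c).symm]
    simp only [decide_eq_decide]
    rw [pv_foldl_count_pos (PySem.List.pyRange 1 c.length 1)
        (fun i => PySem.List.pyGetD c i 0 ≠ PySem.List.pyGetD c (i-1) 0)]
    constructor
    · rintro ⟨i, hmem, hne⟩
      rw [PySem.List.mem_pyRange_one] at hmem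
      refine ⟨by omega, fun hch => ?_⟩
      have h1 : i = ((i.toNat : Nat) : Int) := by omega
      have h2 : i - 1 = (((i.toNat - 1 : Nat)) : Int) := by omega
      rw [h2, h1, PySem.List.pyGetD_natCast, PySem.List.pyGetD_natCast] at hne
      have := pv_chain_getD c hch (i.toNat - 1) (by omega)
      rw [show i.toNat - 1 + 1 = i.toNat by omega] at this
      exact hne this.symm
    · rintro ⟨hl, hch⟩
      obtain ⟨i, hi, hne⟩ := pv_notchain c hch
      refine ⟨((i + 1 : Nat) : Int), ?_, ?_⟩
      · rw [PySem.List.mem_pyRange_one]; push_cast; omega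
      · rw [show ((i + 1 : Nat) : Int) - 1 = ((i : Nat) : Int) by push_cast; omega]
        rw [PySem.List.pyGetD_natCast, PySem.List.pyGetD_natCast]
        exact fun h => hne h.symm

-- a Prop-ite counting fold written as a 0/1 sum over the same list
lemma pv_foldl_ite_sum {α : Type} (L : List α) (P : α → Prop) [DecidablePred P] (s : Int) :
    L.foldl (fun acc x => if P x then acc + 1 else acc) s
      = s + (L.map (fun x => if P x then (1 : Int) else 0)).sum := by
  induction L generalizing s with
  | nil => simp
  | cons x t ih => simp only [List.foldl_cons, List.map_cons, List.sum_cons, ih]; split <;> ring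

-- ===== VERDICT (by name: the statement is the Claim_ definition above) =====
theorem compter_escaliers_spec : Claim_equal_compter_escaliers := by
  intro grille hdom hpre
  unfold Spec_compter_escaliers compter_escaliers compter_escaliers_alt
  rw [PySem.List.foldl_pyRange_zero_pyGetD' grille []
        (fun acc row => if est_escalier_horizontal row then acc + 1 else acc) 0]
  rw [pv_foldl_ite_sum grille (fun row => est_escalier_horizontal row = true) 0]
  rw [pv_foldl_ite_sum (PySem.List.pyRange 0 (PySem.List.pyGetD grille 0 []).length 1)
        (fun j => est_escalier_vertical
          ((PySem.List.pyRange 0 grille.length 1).map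
            (fun i => PySem.List.pyGetD (PySem.List.pyGetD grille i []) j 0)) = true)]
  simp only [List.map_append, List.sum_append, List.map_map, Function.comp_def,
    est_escalier_vertical_eq, est_eq_variee, decide_eq_true_eq, zero_add]
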